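-- pv_equiv track=rewrite | github.com/Arefka/Search_and_sort_algorithms | calculation_the_sum_numbers_value_in_strings_array.py | calculation_the_sum
-- ===== SOURCE A (Python) =====
-- def calculation_the_sum(sentences_list: list) -> int:
--     counter = 0
--     for sentence in sentences_list:
--         integer_value = 0
--         for element in sentence:
--             if element.isdigit():
--                 if integer_value == 0:
--                     integer_value = int(element)
--                     counter += integer_value
--                 else:
--                     counter -= integer_value
--                     counter += int(str(integer_value) + element)
--                     integer_value = 0
--             else:
--                 integer_value = 0
--     return counter
-- ===== SOURCE B (Python) =====
-- def calculation_the_sum(sentences_list: list) -> int: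
--     counter = 0
--     for sentence in sentences_list:
--         i = 0
--         n = len(sentence)
--         while i < n:
--             ch = sentence[i]
--             if ch.isdigit():
--                 v = int(ch)
--                 if v != 0:
--                     if i + 1 < n and sentence[i + 1].isdigit():
--                         counter += 10 * v + int(sentence[i + 1])
--                         i += 2
--                         continue
--                     counter += v
--             i += 1
--     return counter
-- ===== Notes on version B (the rewrite author's own statement) =====
-- stated objective: alternative
-- what changed: B replaces A's per-character state machine (a pending integer_value carried and retracted with counter -= iv) with an index-based lookahead walk that pairs a nonzero digit with the following digit in one arithmetic step (10*v + int(next)) and never retracts from the counter.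
import Mathlib
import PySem

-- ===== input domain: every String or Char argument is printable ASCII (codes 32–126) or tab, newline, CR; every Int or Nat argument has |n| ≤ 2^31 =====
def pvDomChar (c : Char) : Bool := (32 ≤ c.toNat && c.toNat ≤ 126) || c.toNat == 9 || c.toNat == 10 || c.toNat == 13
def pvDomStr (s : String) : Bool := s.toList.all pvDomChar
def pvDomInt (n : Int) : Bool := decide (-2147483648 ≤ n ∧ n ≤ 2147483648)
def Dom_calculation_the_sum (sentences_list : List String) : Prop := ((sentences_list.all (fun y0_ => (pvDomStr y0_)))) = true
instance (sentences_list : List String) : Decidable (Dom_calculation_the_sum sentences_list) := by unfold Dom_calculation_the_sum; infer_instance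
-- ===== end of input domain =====

-- B re-implements A's pending-digit state machine as an index/lookahead walk pairing a nonzero
-- digit directly with the next digit; return values proved equal on the whole ASCII domain.

-- ===== PORT A =====
-- one step of A's inner loop; state = (counter, integer_value).
-- int(element) / int(str(integer_value) + element) are ported exactly via PySem.Int.ofChars?
-- (the .getD 0 default is never reached on the ASCII domain: chars with isdigit there always parse).
def pvAStep (st : Int × Int) (c : Char) : Int × Int :=
  if PySem.Chars.isdigit c then
    if st.2 = 0 then
      (st.1 + (PySem.Int.ofChars? [c]).getD 0, (PySem.Int.ofChars? [c]).getD 0)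
    else
      (st.1 - st.2 + (PySem.Int.ofChars? (PySem.Int.toChars st.2 ++ [c])).getD 0, 0)
  else (st.1, 0)

def calculation_the_sum (sentences_list : List String) : Int :=
  sentences_list.foldl (fun counter sentence => (sentence.toList.foldl pvAStep (counter, 0)).1) 0

-- ===== PORT B =====
-- the `while i < n` lookahead walk of Source B, as structural recursion on the remaining characters
def pvBGo (counter : Int) (cs : List Char) : Int :=
  match cs with
  | [] => counter
  | c :: rest =>
    if PySem.Chars.isdigit c then
      if (PySem.Int.ofChars? [c]).getD 0 ≠ 0 then
        match rest with
        | [] => counter + (PySem.Int.ofChars? [c]).getD 0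
        | d :: rest2 =>
          if PySem.Chars.isdigit d then
            pvBGo (counter + (10 * (PySem.Int.ofChars? [c]).getD 0 + (PySem.Int.ofChars? [d]).getD 0)) rest2
          else
            pvBGo (counter + (PySem.Int.ofChars? [c]).getD 0) (d :: rest2)
      else pvBGo counter rest
    else pvBGo counter rest

def calculation_the_sum_alt (sentences_list : List String) : Int :=
  sentences_list.foldl (fun counter sentence => pvBGo counter sentence.toList) 0

-- ===== PRECONDITION & SPEC =====
def Spec_calculation_the_sum (sentences_list : List String) (out : Int) : Prop := out = calculation_the_sum_alt sentences_list
instance (sentences_list : List String) (out : Int) : Decidable (Spec_calculation_the_sum sentences_list out) := by unfold Spec_calculation_the_sum; infer_instance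

-- ===== CLAIM (what is proved, stated in full; the proofs are below) =====
def Claim_equal_calculation_the_sum : Prop := ∀ (sentences_list : List String), Dom_calculation_the_sum sentences_list → Spec_calculation_the_sum sentences_list (calculation_the_sum sentences_list)

-- ===== LEMMAS AND PROOFS =====

lemma pv_digit_cases (c : Char) (h : PySem.Chars.isdigit c = true) :
    c = '0' ∨ c = '1' ∨ c = '2' ∨ c = '3' ∨ c = '4' ∨ c = '5' ∨ c = '6' ∨ c = '7' ∨ c = '8' ∨ c = '9' := by
  simp only [PySem.Chars.isdigit, Bool.and_eq_true, decide_eq_true_eq, Char.le_def] at h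
  obtain ⟨h1, h2⟩ := h
  have hv : Char.ofNat c.toNat = c := Char.ofNat_toNat c
  have hlo : 48 ≤ c.toNat := h1
  have hhi : c.toNat ≤ 57 := h2
  obtain ⟨n, hn⟩ : ∃ n, c.toNat = n := ⟨_, rfl⟩
  rw [hn] at hlo hhi
  interval_cases n <;> rw [← hv, hn] <;> decide

-- the core arithmetic fact: pairing by int(str(v) + d) equals 10*v + int(d) for digit chars c,d with v = int(c) ≠ 0
lemma pv_pair (c d : Char) (hc : PySem.Chars.isdigit c = true) (hd : PySem.Chars.isdigit d = true)
    (hv : (PySem.Int.ofChars? [c]).getD 0 ≠ 0) :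
    (PySem.Int.ofChars? (PySem.Int.toChars ((PySem.Int.ofChars? [c]).getD 0) ++ [d])).getD 0
      = 10 * (PySem.Int.ofChars? [c]).getD 0 + (PySem.Int.ofChars? [d]).getD 0 := by
  rcases pv_digit_cases c hc with rfl|rfl|rfl|rfl|rfl|rfl|rfl|rfl|rfl|rfl <;>
    first
      | exact absurd (by decide) hv
      | (rcases pv_digit_cases d hd with rfl|rfl|rfl|rfl|rfl|rfl|rfl|rfl|rfl|rfl <;> decide)

lemma pvBGo_not_digit (counter : Int) (c : Char) (rest : List Char)
    (hc : PySem.Chars.isdigit c = false) : pvBGo counter (c :: rest) = pvBGo counter rest := by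
  rw [pvBGo.eq_def]; simp [hc]

lemma pvBGo_zero (counter : Int) (c : Char) (rest : List Char)
    (hc : PySem.Chars.isdigit c = true) (hv : (PySem.Int.ofChars? [c]).getD 0 = 0) :
    pvBGo counter (c :: rest) = pvBGo counter rest := by
  rw [pvBGo.eq_def]; simp [hc, hv]

lemma pvBGo_single (counter : Int) (c : Char)
    (hc : PySem.Chars.isdigit c = true) (hv : (PySem.Int.ofChars? [c]).getD 0 ≠ 0) :
    pvBGo counter [c] = counter + (PySem.Int.ofChars? [c]).getD 0 := by
  rw [pvBGo.eq_def]; simp [hc, hv]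

lemma pvBGo_pairstep (counter : Int) (c d : Char) (rest2 : List Char)
    (hc : PySem.Chars.isdigit c = true) (hv : (PySem.Int.ofChars? [c]).getD 0 ≠ 0)
    (hd : PySem.Chars.isdigit d = true) :
    pvBGo counter (c :: d :: rest2)
      = pvBGo (counter + (10 * (PySem.Int.ofChars? [c]).getD 0 + (PySem.Int.ofChars? [d]).getD 0)) rest2 := by
  rw [pvBGo.eq_def]; simp [hc, hv, hd]

lemma pvBGo_nonpair (counter : Int) (c d : Char) (rest2 : List Char)
    (hc : PySem.Chars.isdigit c = true) (hv : (PySem.Int.ofChars? [c]).getD 0 ≠ 0)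
    (hd : PySem.Chars.isdigit d = false) :
    pvBGo counter (c :: d :: rest2)
      = pvBGo (counter + (PySem.Int.ofChars? [c]).getD 0) (d :: rest2) := by
  rw [pvBGo.eq_def]; simp [hc, hv, hd]

-- the inner loops agree: fuel induction on the length of the character list
lemma pv_inner_eq : ∀ (n : Nat) (cs : List Char), cs.length ≤ n → ∀ counter : Int,
    (List.foldl pvAStep (counter, 0) cs).1 = pvBGo counter cs := by
  intro n
  induction n with
  | zero =>
    intro cs hlen counter
    have : cs = [] := List.eq_nil_of_length_eq_zero (Nat.le_zero.mp hlen)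
    subst this; simp [pvBGo]
  | succ n ih =>
    intro cs hlen counter
    match cs with
    | [] => simp [pvBGo]
    | c :: rest =>
      by_cases hc : PySem.Chars.isdigit c
      · by_cases hv : (PySem.Int.ofChars? [c]).getD 0 = 0
        · -- digit '0': A records it but adds 0 and stays with no pending value
          have hA : pvAStep (counter, 0) c = (counter, 0) := by
            simp [pvAStep, hc, hv]
          rw [List.foldl_cons, hA, pvBGo_zero counter c rest hc hv]
          exact ih rest (by simp at hlen ⊢; omega) counter
        · -- nonzero digit
          have hA : pvAStep (counter, 0) c
              = (counter + (PySem.Int.ofChars? [c]).getD 0, (PySem.Int.ofChars? [c]).getD 0) := by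
            simp [pvAStep, hc]
          rw [List.foldl_cons, hA]
          match rest with
          | [] =>
            rw [pvBGo_single counter c hc hv]
            simp
          | d :: rest2 =>
            by_cases hd : PySem.Chars.isdigit d
            · have hA2 : pvAStep (counter + (PySem.Int.ofChars? [c]).getD 0, (PySem.Int.ofChars? [c]).getD 0) d
                  = (counter + (10 * (PySem.Int.ofChars? [c]).getD 0 + (PySem.Int.ofChars? [d]).getD 0), 0) := by
                simp only [pvAStep, hd, if_true, hv, if_false]
                rw [pv_pair c d hc hd hv]
                congr 1
                ring
              rw [List.foldl_cons, hA2, pvBGo_pairstep counter c d rest2 hc hv (by simpa using hd)]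
              exact ih rest2 (by simp at hlen ⊢; omega) _
            · have hA2 : pvAStep (counter + (PySem.Int.ofChars? [c]).getD 0, (PySem.Int.ofChars? [c]).getD 0) d
                  = (counter + (PySem.Int.ofChars? [c]).getD 0, 0) := by
                simp [pvAStep, hd]
              rw [List.foldl_cons, hA2,
                pvBGo_nonpair counter c d rest2 hc hv (by simpa using hd),
                pvBGo_not_digit _ d rest2 (by simpa using hd)]
              exact ih rest2 (by simp at hlen ⊢; omega) _
      · have hA : pvAStep (counter, 0) c = (counter, 0) := by simp [pvAStep, hc]
        rw [List.foldl_cons, hA, pvBGo_not_digit counter c rest (by simpa using hc)]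
        exact ih rest (by simp at hlen ⊢; omega) counter

lemma pv_outer_eq (l : List String) : ∀ counter : Int,
    l.foldl (fun counter sentence => (sentence.toList.foldl pvAStep (counter, 0)).1) counter
      = l.foldl (fun counter sentence => pvBGo counter sentence.toList) counter := by
  induction l with
  | nil => intro counter; rfl
  | cons s rest ih =>
    intro counter
    simp only [List.foldl_cons]
    rw [pv_inner_eq s.toList.length s.toList (le_refl _) counter]
    exact ih _

-- ===== VERDICT (by name: the statement is the Claim_ definition above) =====
theorem calculation_the_sum_spec : Claim_equal_calculation_the_sum := by
  intro l _
  unfold Spec_calculation_the_sum calculation_the_sum calculation_the_sum_alt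
  exact pv_outer_eq l 0
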